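-- pv_equiv track=rewrite | github.com/Alykill/PoW_gw2_bot | scripts/json_finder.py | collapse_into_occurrences
-- ===== SOURCE A (Python) =====
-- from typing import List, Dict, Any, Tuple
--
-- def collapse_into_occurrences(times_ms: List[int], gap_ms: int):
--     """Collapse consecutive hits whose gap <= gap_ms."""
--     if not times_ms:
--         return []
--     occs = []
--     start = prev = times_ms[0]
--     hits = 1
--     for t in times_ms[1:]:
--         if t - prev <= gap_ms:
--             hits += 1
--         else:
--             occs.append({'start': start, 'end': prev, 'hits': hits})
--             start = t
--             hits = 1
--         prev = t
--     occs.append({'start': start, 'end': prev, 'hits': hits})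
--     return occs
-- ===== SOURCE B (Python) =====
-- def collapse_into_occurrences(times_ms, gap_ms):
--     """Collapse consecutive hits whose gap <= gap_ms.
--
--     Right-to-left strategy: walk the timestamps BACKWARDS, growing run lists
--     from the right end (the grouping rule only looks at adjacent gaps, so the
--     runs are the same from either direction), then emit the records by reading
--     each stored-reversed run backwards.
--     """
--     rev_runs = []  # runs in reverse order, each run stored reversed
--     for t in reversed(times_ms):
--         if rev_runs and rev_runs[-1][-1] - t <= gap_ms:
--             rev_runs[-1].append(t)
--         else:
--             rev_runs.append([t])
--     return [{'start': r[-1], 'end': r[0], 'hits': len(r)} for r in reversed(rev_runs)]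
-- ===== Notes on version B (the rewrite author's own statement) =====
-- stated objective: alternative
-- what changed: B traverses the timestamps right-to-left, growing reversed run lists from the tail (the adjacent-gap rule is direction-independent, so the runs coincide), and then a second pass reads each stored-reversed run backwards to emit {start,end,hits}; A is a single forward loop threading start/prev/hits counters.
import Mathlib
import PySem

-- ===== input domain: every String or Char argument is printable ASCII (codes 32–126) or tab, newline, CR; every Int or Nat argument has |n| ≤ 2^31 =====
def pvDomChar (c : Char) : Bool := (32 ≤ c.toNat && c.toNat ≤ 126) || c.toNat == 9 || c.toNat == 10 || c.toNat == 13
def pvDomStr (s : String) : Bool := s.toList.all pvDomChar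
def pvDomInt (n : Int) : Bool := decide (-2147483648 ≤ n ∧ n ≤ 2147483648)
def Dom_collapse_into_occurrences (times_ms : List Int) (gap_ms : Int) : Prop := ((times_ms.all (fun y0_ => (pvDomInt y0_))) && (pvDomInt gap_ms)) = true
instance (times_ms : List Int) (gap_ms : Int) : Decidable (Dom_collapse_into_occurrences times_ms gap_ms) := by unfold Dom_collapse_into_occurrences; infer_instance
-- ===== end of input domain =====

-- B groups the timestamps by a RIGHT-to-left traversal (growing reversed run lists from
-- the tail, correct because the adjacent-gap rule is direction-independent) and then maps
-- runs to records, instead of A's forward loop threading start/prev/hits counters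
-- (objective: alternative, same O(n) cost).


-- ===== PORT A =====
-- A's loop over times_ms[1:] with state (occs, start, prev, hits), transliterated as
-- structural recursion over the remaining list.
def collapseLoopA (gap_ms : Int) (occs : List (List (String × Int))) (start prev : Int)
    (hits : Int) : List Int → List (List (String × Int))
  | [] => occs ++ [[("start", start), ("end", prev), ("hits", hits)]]
  | t :: ts =>
    if t - prev ≤ gap_ms then
      collapseLoopA gap_ms occs start t (hits + 1) ts
    else
      collapseLoopA gap_ms (occs ++ [[("start", start), ("end", prev), ("hits", hits)]]) t t 1 ts

def collapse_into_occurrences (times_ms : List Int) (gap_ms : Int) : List (List (String × Int)) :=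
  match times_ms with
  | [] => []
  | t0 :: rest => collapseLoopA gap_ms [] t0 t0 1 rest

-- ===== PORT B =====
-- B's loop body over reversed(times_ms): state rev_runs (runs in reverse order, each run
-- stored reversed); rev_runs[-1] = getLast?, in-place append = dropLast ++ [r ++ [t]].
def stepB (gap_ms : Int) (rev_runs : List (List Int)) (t : Int) : List (List Int) :=
  match rev_runs.getLast? with
  | none => [[t]]
  | some r =>
    if r.getLastD 0 - t ≤ gap_ms then rev_runs.dropLast ++ [r ++ [t]]
    else rev_runs ++ [[t]]

-- B: fold the step over reversed(times_ms), then the final comprehension over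
-- reversed(rev_runs) reads r[-1] as start and r[0] as end.
def collapse_into_occurrences_alt (times_ms : List Int) (gap_ms : Int) : List (List (String × Int)) :=
  ((times_ms.reverse.foldl (stepB gap_ms) []).reverse).map
    (fun r => [("start", r.getLastD 0), ("end", r.headD 0), ("hits", (r.length : Int))])

-- ===== PRECONDITION & SPEC =====
def Spec_collapse_into_occurrences (times_ms : List Int) (gap_ms : Int) (out : List (List (String × Int))) : Prop := out = collapse_into_occurrences_alt times_ms gap_ms
instance (times_ms : List Int) (gap_ms : Int) (out : List (List (String × Int))) : Decidable (Spec_collapse_into_occurrences times_ms gap_ms out) := by unfold Spec_collapse_into_occurrences; infer_instance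

-- ===== CLAIM (what is proved, stated in full; the proofs are below) =====
def Claim_equal_collapse_into_occurrences : Prop := ∀ (times_ms : List Int) (gap_ms : Int), Dom_collapse_into_occurrences times_ms gap_ms → Spec_collapse_into_occurrences times_ms gap_ms (collapse_into_occurrences times_ms gap_ms)

-- ===== LEMMAS AND PROOFS =====
-- Proof-only canonical grouping: runsOf computes the runs by recursion on the list
-- (equivalently, right-to-left), merging the head into the following run when the
-- adjacent gap is small. Both ports are shown equal to (runsOf …).map runToOcc.
def runsOf (gap_ms : Int) : List Int → List (List Int)
  | [] => []
  | t :: ts =>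
    match runsOf gap_ms ts with
    | [] => [[t]]
    | r :: rs => if r.headD 0 - t ≤ gap_ms then (t :: r) :: rs else [t] :: r :: rs

def runToOcc (r : List Int) : List (String × Int) :=
  [("start", r.headD 0), ("end", r.getLastD 0), ("hits", (r.length : Int))]

-- Proof-only forward grouping with accumulator (intermediate between A and runsOf).
def collapseRunsH (gap_ms : Int) (runs : List (List Int)) (cur : List Int) :
    List Int → List (List Int)
  | [] => runs ++ [cur]
  | t :: ts =>
    if t - cur.getLastD 0 ≤ gap_ms then
      collapseRunsH gap_ms runs (cur ++ [t]) ts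
    else
      collapseRunsH gap_ms (runs ++ [cur]) [t] ts

theorem collapseRunsH_acc (gap_ms : Int) (ts : List Int) :
    ∀ (runs : List (List Int)) (cur : List Int),
      collapseRunsH gap_ms runs cur ts = runs ++ collapseRunsH gap_ms [] cur ts := by
  induction ts with
  | nil => intro runs cur; simp [collapseRunsH]
  | cons t ts ih =>
    intro runs cur
    simp only [collapseRunsH]
    split_ifs with h
    · rw [ih runs (cur ++ [t])]
    · simp only [List.nil_append]
      rw [ih (runs ++ [cur]) [t], ih [cur] [t]]
      simp

theorem runsOf_cons (gap_ms t : Int) (ts : List Int) :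
    ∃ s rs, runsOf gap_ms (t :: ts) = (t :: s) :: rs := by
  cases h : runsOf gap_ms ts with
  | nil => exact ⟨[], [], by rw [runsOf, h]⟩
  | cons r rs =>
    by_cases hle : r.headD 0 - t ≤ gap_ms
    · exact ⟨r, rs, by rw [runsOf, h]; dsimp only; rw [if_pos hle]⟩
    · exact ⟨[], r :: rs, by rw [runsOf, h]; dsimp only; rw [if_neg hle]⟩

-- A's accumulator equals the mapped finished runs; (start, prev, hits) are
-- head/last/length of the forward helper's current run.
theorem collapseLoopA_eq_runsH (gap_ms : Int) (ts : List Int) :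
    ∀ (runs : List (List Int)) (cur : List Int), cur ≠ [] →
      collapseLoopA gap_ms (runs.map runToOcc) (cur.headD 0) (cur.getLastD 0)
        (cur.length : Int) ts = (collapseRunsH gap_ms runs cur ts).map runToOcc := by
  induction ts with
  | nil =>
    intro runs cur _
    simp [collapseLoopA, collapseRunsH, runToOcc]
  | cons t ts ih =>
    intro runs cur hcur
    simp only [collapseLoopA, collapseRunsH]
    split_ifs with h
    · have key := ih runs (cur ++ [t]) (by simp)
      have h1 : (cur ++ [t]).headD 0 = cur.headD 0 := by
        cases cur with
        | nil => exact absurd rfl hcur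
        | cons a l => simp
      have h2 : (cur ++ [t]).getLastD 0 = t := by simp
      have h3 : ((cur ++ [t]).length : Int) = (cur.length : Int) + 1 := by simp
      rw [h1, h2, h3] at key
      exact key
    · have := ih (runs ++ [cur]) [t] (by simp)
      simpa [runToOcc] using this

-- The forward helper peels runs exactly as runsOf does.
theorem collapseRunsH_eq_runsOf (gap_ms : Int) (ts : List Int) :
    ∀ (c : List Int) (p : Int),
      collapseRunsH gap_ms [] (c ++ [p]) ts =
        (c ++ (runsOf gap_ms (p :: ts)).headD []) :: (runsOf gap_ms (p :: ts)).tail := by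
  induction ts with
  | nil => intro c p; simp [collapseRunsH, runsOf]
  | cons t ts ih =>
    intro c p
    obtain ⟨s, rs, hs⟩ := runsOf_cons gap_ms t ts
    simp only [collapseRunsH, List.getLastD_concat]
    split_ifs with h
    · have key := ih (c ++ [p]) t
      rw [key, hs]
      have hpt : runsOf gap_ms (p :: t :: ts) = (p :: t :: s) :: rs := by
        rw [runsOf, hs]
        simp only [List.headD_cons]
        rw [if_pos h]
      rw [hpt]
      simp
    · rw [collapseRunsH_acc]
      have key := ih ([] : List Int) t
      simp only [List.nil_append] at key
      rw [key, hs]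
      have hpt : runsOf gap_ms (p :: t :: ts) = [p] :: (t :: s) :: rs := by
        rw [runsOf, hs]
        simp only [List.headD_cons]
        rw [if_neg h]
      rw [hpt]
      simp

-- B's folded state equals runsOf, with the run list reversed and each run reversed.
theorem foldB_eq_runsOf (gap_ms : Int) (ts : List Int) :
    ts.reverse.foldl (stepB gap_ms) [] = ((runsOf gap_ms ts).map List.reverse).reverse := by
  induction ts with
  | nil => simp [runsOf]
  | cons t ts ih =>
    have hstep : (t :: ts).reverse.foldl (stepB gap_ms) [] =
        stepB gap_ms (ts.reverse.foldl (stepB gap_ms) []) t := by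
      simp [List.foldl_append]
    rw [hstep, ih]
    cases h : runsOf gap_ms ts with
    | nil => simp [stepB, runsOf, h]
    | cons r rs =>
      simp only [runsOf, h]
      have hlast : (((r :: rs).map List.reverse).reverse).getLast? = some r.reverse := by
        simp
      have hrev : r.reverse.getLastD 0 = r.headD 0 := by
        simp [List.getLast?_reverse, List.getLastD_eq_getLast?]
      by_cases hle : r.headD 0 - t ≤ gap_ms
      · rw [if_pos hle]
        simp only [stepB, hlast]
        rw [hrev, if_pos hle]
        simp
      · rw [if_neg hle]
        simp only [stepB, hlast]
        rw [hrev, if_neg hle]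
        simp

-- Reading a reversed run backwards yields runToOcc of the run.
theorem occ_of_reverse (r : List Int) :
    [(("start" : String), r.reverse.getLastD 0), (("end" : String), r.reverse.headD 0),
     (("hits" : String), (r.reverse.length : Int))] = runToOcc r := by
  have h1 : r.reverse.getLastD 0 = r.headD 0 := by
    simp [List.getLast?_reverse, List.getLastD_eq_getLast?]
  have h2 : r.reverse.headD 0 = r.getLastD 0 := by
    simp [List.head?_reverse, List.getLastD_eq_getLast?]
  rw [runToOcc, h1, h2, List.length_reverse]

theorem alt_eq_runsOf (gap_ms : Int) (ts : List Int) :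
    collapse_into_occurrences_alt ts gap_ms = (runsOf gap_ms ts).map runToOcc := by
  unfold collapse_into_occurrences_alt
  rw [foldB_eq_runsOf]
  simp only [List.reverse_reverse, List.map_map]
  refine List.map_congr_left ?_
  intro r _
  simpa using occ_of_reverse r

-- ===== VERDICT (by name: the statement is the Claim_ definition above) =====
theorem collapse_into_occurrences_spec : Claim_equal_collapse_into_occurrences := by
  intro times_ms gap_ms _
  unfold Spec_collapse_into_occurrences
  cases times_ms with
  | nil => simp [collapse_into_occurrences, collapse_into_occurrences_alt]
  | cons t0 rest =>
    rw [alt_eq_runsOf]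
    obtain ⟨s, rs, hs⟩ := runsOf_cons gap_ms t0 rest
    have hA := collapseLoopA_eq_runsH gap_ms rest [] [t0] (by simp)
    simp only [List.map_nil] at hA
    have hH := collapseRunsH_eq_runsOf gap_ms rest [] t0
    simp only [List.nil_append] at hH
    simp at hA
    simp only [collapse_into_occurrences]
    rw [hA, hH, hs]
    simp
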